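-- pv_equiv track=rewrite | github.com/enabeteleazar/Neron-server | Services/services/dashboard/backend/api/docker.py | get_docker_summary
-- ===== SOURCE A (Python) =====
-- def get_docker_summary(containers):
--     total = len(containers)
--     running = sum(1 for c in containers if c["status"] == "running")
--     stopped = sum(1 for c in containers if c["status"] in ["exited", "created"])
--     paused = sum(1 for c in containers if c["status"] == "paused")
--
--     return {
--         "total": total,
--         "running": running,
--         "stopped": stopped,
--         "paused": paused
--     }
-- ===== SOURCE B (Python) =====
-- def get_docker_summary(containers):
--     counts = {}
--     for c in containers:
--         s = c["status"]
--         counts[s] = counts.get(s, 0) + 1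
--     return {
--         "total": len(containers),
--         "running": counts.get("running", 0),
--         "stopped": counts.get("exited", 0) + counts.get("created", 0),
--         "paused": counts.get("paused", 0),
--     }
-- ===== Notes on version B (the rewrite author's own statement) =====
-- stated objective: simpler
-- what changed: B builds a status frequency table in one pass over the list and derives each summary field from table lookups, instead of A's three separate full scans with a generator-sum each.
import Mathlib
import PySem

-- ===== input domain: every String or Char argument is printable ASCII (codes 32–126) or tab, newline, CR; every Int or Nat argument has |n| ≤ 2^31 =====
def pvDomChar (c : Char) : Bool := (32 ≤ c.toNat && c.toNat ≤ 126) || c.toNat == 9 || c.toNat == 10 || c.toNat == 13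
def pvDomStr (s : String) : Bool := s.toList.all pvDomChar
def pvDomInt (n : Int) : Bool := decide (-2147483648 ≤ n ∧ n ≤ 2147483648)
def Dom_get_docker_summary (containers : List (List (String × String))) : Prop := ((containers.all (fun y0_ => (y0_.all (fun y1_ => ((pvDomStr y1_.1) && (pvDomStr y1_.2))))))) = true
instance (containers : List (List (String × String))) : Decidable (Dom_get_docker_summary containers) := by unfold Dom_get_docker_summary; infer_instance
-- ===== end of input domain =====

-- B builds a status frequency table in one pass and reads each field from it, instead of A's three full scans. Equal on all inputs where A returns (missing "status" keys, where Python raises KeyError, are outside Pre_).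

-- ===== PORT A =====
-- c["status"] on the container dict (first match in the association list; none = KeyError, excluded by Pre_)
def statusOf (c : List (String × String)) : Option String :=
  (PySem.Dict.mk c).get? "status"

def get_docker_summary (containers : List (List (String × String))) : List (String × Int) :=
  let total : Int := containers.length
  let running : Int := containers.foldl (fun acc c => if statusOf c = some "running" then acc + 1 else acc) 0
  let stopped : Int := containers.foldl (fun acc c => if statusOf c = some "exited" ∨ statusOf c = some "created" then acc + 1 else acc) 0
  let paused : Int := containers.foldl (fun acc c => if statusOf c = some "paused" then acc + 1 else acc) 0
  [("total", total), ("running", running), ("stopped", stopped), ("paused", paused)]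

-- ===== PORT B =====
def get_docker_summary_alt (containers : List (List (String × String))) : List (String × Int) :=
  let counts : PySem.Dict String Int :=
    containers.foldl (fun d c =>
      match statusOf c with              -- the none branch only makes the loop total; Python raises there (outside Pre_)
      | some s => d.insert s (d.getD s 0 + 1)
      | none => d) (PySem.Dict.empty : PySem.Dict String Int)
  [("total", (containers.length : Int)),
   ("running", counts.getD "running" 0),
   ("stopped", counts.getD "exited" 0 + counts.getD "created" 0),
   ("paused", counts.getD "paused" 0)]

-- ===== PRECONDITION & SPEC =====
-- Pre_ excludes exactly the containers without a "status" key, on which Python A (and B) raise KeyError.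
def Pre_get_docker_summary (containers : List (List (String × String))) : Prop :=
  ∀ c ∈ containers, c.any (fun p => p.1 == "status") = true
instance (containers : List (List (String × String))) : Decidable (Pre_get_docker_summary containers) := by unfold Pre_get_docker_summary; infer_instance

def pvWitness_get_docker_summary : (List (List (String × String))) :=
  [[("status", "running")], [("status", "exited"), ("name", "x")], [("status", "paused")]]

def Spec_get_docker_summary (containers : List (List (String × String))) (out : List (String × Int)) : Prop := out = get_docker_summary_alt containers
instance (containers : List (List (String × String))) (out : List (String × Int)) : Decidable (Spec_get_docker_summary containers out) := by unfold Spec_get_docker_summary; infer_instance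

-- ===== CLAIM (what is proved, stated in full; the proofs are below) =====
def Claim_equal_get_docker_summary : Prop := ∀ (containers : List (List (String × String))), Dom_get_docker_summary containers → Pre_get_docker_summary containers → Spec_get_docker_summary containers (get_docker_summary containers)

-- ===== LEMMAS AND PROOFS =====

-- B's tally loop is the plain counting fold over the extracted statuses
theorem tally_eq_filterMap (l : List (List (String × String))) (d : PySem.Dict String Int) :
    l.foldl (fun d c =>
      match statusOf c with
      | some s => d.insert s (d.getD s 0 + 1)
      | none => d) (d : PySem.Dict String Int)
    = (l.filterMap statusOf).foldl (fun d s => d.insert s (d.getD s 0 + 1)) d := by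
  induction l generalizing d with
  | nil => rfl
  | cons c t ih =>
    cases h : statusOf c <;> simp [h, ih]

theorem tally_getD (l : List (List (String × String))) (v : String) :
    (l.foldl (fun d c =>
      match statusOf c with
      | some s => d.insert s (d.getD s 0 + 1)
      | none => d) (PySem.Dict.empty : PySem.Dict String Int)).getD v 0
    = (l.countP (fun c => statusOf c == some v) : Int) := by
  rw [tally_eq_filterMap, PySem.Dict.getD_foldl_insert_add_one, List.count_filterMap]
  simp

-- A's "in [exited, created]" scan splits into the two disjoint counts
theorem countP_exited_created (l : List (List (String × String))) :
    l.countP (fun c => decide (statusOf c = some "exited" ∨ statusOf c = some "created"))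
    = l.countP (fun c => statusOf c == some "exited") + l.countP (fun c => statusOf c == some "created") := by
  induction l with
  | nil => rfl
  | cons c t ih =>
    by_cases h1 : statusOf c = some "exited" <;> by_cases h2 : statusOf c = some "created" <;>
      simp_all <;> omega

-- ===== VERDICT (by name: the statement is the Claim_ definition above) =====
theorem get_docker_summary_spec : Claim_equal_get_docker_summary := by
  intro containers _ _
  show get_docker_summary containers = get_docker_summary_alt containers
  have hr := PySem.List.foldl_count_if (fun c => decide (statusOf c = some "running")) containers 0
  have hs := PySem.List.foldl_count_if (fun c => decide (statusOf c = some "exited" ∨ statusOf c = some "created")) containers 0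
  have hp := PySem.List.foldl_count_if (fun c => decide (statusOf c = some "paused")) containers 0
  simp only [decide_eq_true_eq] at hr hs hp
  simp only [get_docker_summary, get_docker_summary_alt, hr, hs, hp, tally_getD,
    countP_exited_created]
  have e1 : ∀ l : List (List (String × String)),
      l.countP (fun c => decide (statusOf c = some "running")) = l.countP (fun c => statusOf c == some "running") :=
    fun l => List.countP_congr (fun c _ => by simp)
  have e2 : ∀ l : List (List (String × String)),
      l.countP (fun c => decide (statusOf c = some "paused")) = l.countP (fun c => statusOf c == some "paused") :=
    fun l => List.countP_congr (fun c _ => by simp)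
  simp [e1, e2]
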